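-- pv_equiv track=rewrite | github.com/kmzn128/atcoder | b052/b.py | Main
-- ===== SOURCE A (Python) =====
-- def Main(N, S):
--     ans = 0
--     mx = ans
--     for c in S:
--         if c == "I":
--             ans += 1
--         else:
--             ans -= 1
--         mx = max(mx, ans)
--     return mx
-- ===== SOURCE B (Python) =====
-- def Main(N, S):
--     # Divide and conquer: for a string s, compute (total balance, best prefix
--     # balance including the empty prefix). For s = L+R:
--     #   total = total(L)+total(R),  best = max(best(L), total(L)+best(R)),
--     # since any prefix lies inside L or is all of L followed by a prefix of R.
--     return _dc(S)[1]
--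
-- def _dc(s):
--     if len(s) == 0:
--         return (0, 0)
--     if len(s) == 1:
--         v = 1 if s == "I" else -1
--         return (v, max(0, v))
--     m = len(s) // 2
--     ls, lb = _dc(s[:m])
--     rs, rb = _dc(s[m:])
--     return (ls + rs, max(lb, ls + rb))
-- ===== Notes on version B (the rewrite author's own statement) =====
-- stated objective: alternative
-- what changed: B replaces A's left-to-right running-max fold by a divide-and-conquer recursion that splits the string in halves and combines (total balance, best prefix balance) pairs.
import Mathlib
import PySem

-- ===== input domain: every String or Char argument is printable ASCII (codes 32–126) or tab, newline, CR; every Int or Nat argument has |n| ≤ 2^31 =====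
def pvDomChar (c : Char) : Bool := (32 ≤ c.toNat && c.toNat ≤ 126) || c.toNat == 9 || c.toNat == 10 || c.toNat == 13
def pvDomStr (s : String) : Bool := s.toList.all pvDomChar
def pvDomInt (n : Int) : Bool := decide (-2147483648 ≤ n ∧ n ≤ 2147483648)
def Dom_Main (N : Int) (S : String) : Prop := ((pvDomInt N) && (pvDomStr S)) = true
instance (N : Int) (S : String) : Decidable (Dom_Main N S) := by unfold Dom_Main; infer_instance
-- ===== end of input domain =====

-- B computes the answer by divide-and-conquer on string halves (combining (total, best-prefix) pairs) instead of A's single running-max fold; objective: alternative algorithm, same cost.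


-- ===== PORT A =====
def Main (N : Int) (S : String) : Int :=
  (S.toList.foldl
    (fun (p : Int × Int) c =>
      let ans := if c = 'I' then p.1 + 1 else p.1 - 1
      (ans, max p.2 ans))
    (0, 0)).2

-- ===== PORT B =====
-- the _dc helper of Source B: (total balance, best prefix balance incl. empty prefix)
def pvDc (l : List Char) : Int × Int :=
  if h : l.length ≤ 1 then
    match l with
    | [] => (0, 0)
    | c :: _ =>
      let v : Int := if c = 'I' then 1 else -1
      (v, max 0 v)
  else
    let m := l.length / 2
    let L := pvDc (l.take m)
    let R := pvDc (l.drop m)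
    (L.1 + R.1, max L.2 (L.1 + R.2))
termination_by l.length
decreasing_by
  · simp only [List.length_take]; omega
  · simp only [List.length_drop]; omega

def Main_alt (N : Int) (S : String) : Int := (pvDc S.toList).2

-- ===== PRECONDITION & SPEC =====
def Spec_Main (N : Int) (S : String) (out : Int) : Prop := out = Main_alt N S
instance (N : Int) (S : String) (out : Int) : Decidable (Spec_Main N S out) := by unfold Spec_Main; infer_instance

-- ===== CLAIM (what is proved, stated in full; the proofs are below) =====
def Claim_equal_Main : Prop := ∀ (N : Int) (S : String), Dom_Main N S → Spec_Main N S (Main N S)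

-- ===== LEMMAS AND PROOFS =====
-- semantic yardstick: per-char value, total balance, best prefix balance (incl. empty)
def pvVal (c : Char) : Int := if c = 'I' then 1 else -1
def pvSum : List Char → Int
  | [] => 0
  | c :: cs => pvVal c + pvSum cs
def pvBest : List Char → Int
  | [] => 0
  | c :: cs => max 0 (pvVal c + pvBest cs)

theorem pvBest_nonneg (l : List Char) : 0 ≤ pvBest l := by
  cases l <;> simp [pvBest]

theorem pvSum_append (l₁ l₂ : List Char) : pvSum (l₁ ++ l₂) = pvSum l₁ + pvSum l₂ := by
  induction l₁ with
  | nil => simp [pvSum]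
  | cons c cs ih => simp [pvSum, ih]; ring

theorem pvBest_append (l₁ l₂ : List Char) :
    pvBest (l₁ ++ l₂) = max (pvBest l₁) (pvSum l₁ + pvBest l₂) := by
  induction l₁ with
  | nil =>
    have := pvBest_nonneg l₂
    simp [pvBest, pvSum]
    omega
  | cons c cs ih =>
    simp only [List.cons_append, pvBest, pvSum, ih]
    rcases le_total (pvBest cs) (pvSum cs + pvBest l₂) with h | h <;>
      simp [max_def] <;> split_ifs <;> omega

theorem pvDc_eq (l : List Char) : pvDc l = (pvSum l, pvBest l) := by
  induction l using pvDc.induct with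
  | case1 _ _ =>
    simp [pvDc, pvSum, pvBest]
  | case2 c rest h _ =>
    have : rest = [] := by
      cases rest with
      | nil => rfl
      | cons _ _ => simp at h
    subst this
    simp [pvDc, pvSum, pvBest, pvVal]
  | case3 l h _m ih1 ih2 =>
    rw [pvDc]
    simp only [dif_neg h]
    rw [ih1, ih2]
    have hsplit : l.take (l.length / 2) ++ l.drop (l.length / 2) = l := List.take_append_drop _ _
    simp only [Prod.mk.injEq]
    refine ⟨?_, ?_⟩
    · conv_rhs => rw [← hsplit]
      rw [pvSum_append]
    · conv_rhs => rw [← hsplit]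
      rw [pvBest_append]

theorem pvFoldA (l : List Char) (a m : Int) (h : a ≤ m) :
    (l.foldl
      (fun (p : Int × Int) c =>
        let ans := if c = 'I' then p.1 + 1 else p.1 - 1
        (ans, max p.2 ans))
      (a, m)).2 = max m (a + pvBest l) := by
  induction l generalizing a m with
  | nil => simp [pvBest]; omega
  | cons c cs ih =>
    simp only [List.foldl, pvBest, pvVal]
    have hv : (if c = 'I' then a + 1 else a - 1) = a + (if c = 'I' then (1:Int) else -1) := by
      split <;> ring
    rw [hv, ih (a + (if c = 'I' then (1:Int) else -1)) _ (le_max_right _ _)]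
    have hb := pvBest_nonneg cs
    rcases le_total m (a + (if c = 'I' then (1:Int) else -1)) with h1 | h1 <;>
      simp [max_def] <;> split_ifs <;> omega

-- ===== VERDICT (by name: the statement is the Claim_ definition above) =====
theorem Main_spec : Claim_equal_Main := by
  intro N S _
  unfold Spec_Main Main Main_alt
  rw [pvFoldA _ _ _ le_rfl, pvDc_eq]
  have := pvBest_nonneg S.toList
  simp
  omega
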